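-- pv_equiv track=rewrite | github.com/Nardos-serkalem/iCog_Labs_Projects | test.py | unique_combinations
-- ===== SOURCE A (Python) =====
-- def flatten_list(nested_list):
--     if isinstance(nested_list, list):
--         return [item for sublist in nested_list for item in flatten_list(sublist)]
--     return [nested_list]
--
-- def unique_combinations(combinations, list1, list2):
--     flat_list1_set = set(str(item) for item in flatten_list(list1))
--     flat_list2_set = set(str(item) for item in flatten_list(list2))
--     seen, unique_combos = set(), []
--     for combo in combinations:
--         sorted_combo = tuple(sorted(str(item) for item in combo))
--         combo_set = set(sorted_combo)
--         if sorted_combo not in seen and combo_set != flat_list1_set and combo_set != flat_list2_set: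
--             seen.add(sorted_combo)
--             unique_combos.append(combo)
--     return unique_combos
-- ===== SOURCE B (Python) =====
-- def flatten_list(nested_list):
--     # iterative flatten: explicit worklist stack, only `list` instances are recursed
--     out = []
--     stack = [nested_list]
--     while stack:
--         x = stack.pop()
--         if isinstance(x, list):
--             stack.extend(reversed(x))
--         else:
--             out.append(x)
--     return out
--
-- def unique_combinations(combinations, list1, list2):
--     s1 = set(str(item) for item in flatten_list(list1))
--     s2 = set(str(item) for item in flatten_list(list2))
--     first = {}
--     for combo in combinations:
--         key = tuple(sorted(str(item) for item in combo))
--         first.setdefault(key, combo)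
--     return [c for k, c in first.items() if set(k) != s1 and set(k) != s2]
-- ===== Notes on version B (the rewrite author's own statement) =====
-- stated objective: alternative
-- what changed: flatten_list becomes an iterative explicit-stack traversal instead of recursion, and the main loop is split into a first-occurrence dict built with setdefault followed by a filtering comprehension over its items, instead of a single pass carrying a seen-set and an output accumulator.
import Mathlib
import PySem

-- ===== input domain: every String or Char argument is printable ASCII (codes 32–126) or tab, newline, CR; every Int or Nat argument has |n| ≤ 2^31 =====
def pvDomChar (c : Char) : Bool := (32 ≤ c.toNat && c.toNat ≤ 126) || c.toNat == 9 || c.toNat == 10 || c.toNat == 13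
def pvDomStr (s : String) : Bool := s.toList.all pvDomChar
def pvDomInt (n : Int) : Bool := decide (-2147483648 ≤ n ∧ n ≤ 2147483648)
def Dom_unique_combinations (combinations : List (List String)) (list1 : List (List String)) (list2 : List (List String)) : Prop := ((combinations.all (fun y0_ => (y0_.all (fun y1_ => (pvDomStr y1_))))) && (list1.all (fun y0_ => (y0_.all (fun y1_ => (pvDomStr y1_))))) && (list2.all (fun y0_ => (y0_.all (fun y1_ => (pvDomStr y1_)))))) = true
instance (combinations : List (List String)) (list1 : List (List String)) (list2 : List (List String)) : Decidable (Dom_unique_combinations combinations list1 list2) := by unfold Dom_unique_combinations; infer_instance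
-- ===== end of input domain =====

-- B replaces flatten_list's recursion by an explicit-stack traversal and splits A's single
-- seen-set loop into a first-occurrence dict (setdefault) followed by a filtering pass (objective: alternative).
-- ===== PORT A =====
-- flatten_list at this type: each element of `nested_list` is a list of strings, each string is an
-- atom, so flatten_list(sublist) = [item for x in sublist for item in [x]]; str(item) on a str is identity.
def flatten_list (nested_list : List (List String)) : List String :=
  nested_list.flatMap (fun sublist => sublist.flatMap (fun item => [item]))

def unique_combinations (combinations : List (List String)) (list1 : List (List String)) (list2 : List (List String)) : List (List String) :=
  let flat_list1_set : PySem.Set String := PySem.Set.ofList ((flatten_list list1).map (fun item => item))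
  let flat_list2_set : PySem.Set String := PySem.Set.ofList ((flatten_list list2).map (fun item => item))
  let res := combinations.foldl
    (fun (st : PySem.Set (List String) × List (List String)) combo =>
      let seen := st.1
      let unique_combos := st.2
      let sorted_combo := PySem.List.sorted (combo.map (fun item => item)) (fun x => x) false
      let combo_set : PySem.Set String := PySem.Set.ofList sorted_combo
      if !(PySem.Set.contains seen sorted_combo)
         && (!(PySem.Set.equal combo_set flat_list1_set)
             && !(PySem.Set.equal combo_set flat_list2_set)) then
        (PySem.Set.add seen sorted_combo, unique_combos ++ [combo])
      else st)
    (PySem.Set.empty, [])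
  res.2

-- ===== PORT B =====
-- stack items for the iterative flatten (head of the list = top of the Python stack)
inductive FItem
  | str  : String → FItem
  | lst1 : List String → FItem
  | lst2 : List (List String) → FItem
deriving DecidableEq, Repr

def fsize : FItem → Nat
  | .str _ => 1
  | .lst1 l => l.length + 1
  | .lst2 l => (l.map (fun s => s.length + 1)).sum + 1

-- the while-stack loop of B's flatten_list: pop the top; a list pushes its members (top = first), an atom is emitted
def floodLoop : List FItem → List String → List String
  | [], out => out
  | .str s :: rest, out => floodLoop rest (out ++ [s])
  | .lst1 l :: rest, out => floodLoop (l.map FItem.str ++ rest) out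
  | .lst2 l :: rest, out => floodLoop (l.map FItem.lst1 ++ rest) out
termination_by st _ => (st.map fsize).sum
decreasing_by
  · simp [fsize]
  · simp [fsize, List.map_map, Function.comp_def]
  · simp [fsize, List.map_map, Function.comp_def]

def flatten_iter (nested_list : List (List String)) : List String :=
  floodLoop [FItem.lst2 nested_list] []

def unique_combinations_alt (combinations : List (List String)) (list1 : List (List String)) (list2 : List (List String)) : List (List String) :=
  let s1 : PySem.Set String := PySem.Set.ofList ((flatten_iter list1).map (fun item => item))
  let s2 : PySem.Set String := PySem.Set.ofList ((flatten_iter list2).map (fun item => item))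
  let first : PySem.Dict (List String) (List String) := combinations.foldl
    (fun d combo =>
      d.setdefault (PySem.List.sorted (combo.map (fun item => item)) (fun x => x) false) combo)
    PySem.Dict.empty
  (first.items.filter
    (fun p => !(PySem.Set.equal (PySem.Set.ofList p.1) s1)
           && !(PySem.Set.equal (PySem.Set.ofList p.1) s2))).map (fun p => p.2)

-- ===== PRECONDITION & SPEC =====
def Spec_unique_combinations (combinations : List (List String)) (list1 : List (List String)) (list2 : List (List String)) (out : List (List String)) : Prop := out = unique_combinations_alt combinations list1 list2
instance (combinations : List (List String)) (list1 : List (List String)) (list2 : List (List String)) (out : List (List String)) : Decidable (Spec_unique_combinations combinations list1 list2 out) := by unfold Spec_unique_combinations; infer_instance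

-- ===== CLAIM (what is proved, stated in full; the proofs are below) =====
def Claim_equal_unique_combinations : Prop := ∀ (combinations : List (List String)) (list1 : List (List String)) (list2 : List (List String)), Dom_unique_combinations combinations list1 list2 → Spec_unique_combinations combinations list1 list2 (unique_combinations combinations list1 list2)

-- ===== LEMMAS AND PROOFS =====

theorem floodLoop_str (l : List String) (rest : List FItem) (out : List String) :
    floodLoop (l.map FItem.str ++ rest) out = floodLoop rest (out ++ l) := by
  induction l generalizing out with
  | nil => simp
  | cons x xs ih => simp [floodLoop, ih]

theorem floodLoop_lst1 (l : List (List String)) (rest : List FItem) (out : List String) :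
    floodLoop (l.map FItem.lst1 ++ rest) out = floodLoop rest (out ++ l.flatten) := by
  induction l generalizing out with
  | nil => simp
  | cons x xs ih => simp [floodLoop, floodLoop_str, ih]

theorem flatten_iter_eq (l : List (List String)) : flatten_iter l = flatten_list l := by
  have h := floodLoop_lst1 l [] []
  simp [floodLoop] at h
  simp [flatten_iter, floodLoop, h, flatten_list]

-- the main loop invariant: A's fold state vs B's first-occurrence dict
theorem set_contains_add {α : Type} [BEq α] [LawfulBEq α] (s : PySem.Set α) (x y : α) :
    ((s.add x).contains y = true) ↔ (s.contains y = true ∨ y = x) := by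
  rw [PySem.Set.contains_iff, PySem.Set.mem_add, PySem.Set.contains_iff]

theorem loop_eq (ok : List String → Bool) (cs : List (List String))
    (seen : PySem.Set (List String)) (acc : List (List String))
    (d : PySem.Dict (List String) (List String))
    (hseen : ∀ k, PySem.Set.contains seen k = (d.contains k && ok k))
    (hacc : acc = (d.items.filter (fun p => ok p.1)).map (fun p => p.2)) :
    (cs.foldl
      (fun (st : PySem.Set (List String) × List (List String)) combo =>
        let k := PySem.List.sorted (combo.map (fun item => item)) (fun x => x) false
        if !(PySem.Set.contains st.1 k) && ok k then
          (PySem.Set.add st.1 k, st.2 ++ [combo])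
        else st)
      (seen, acc)).2
    = (((cs.foldl (fun d combo =>
          d.setdefault (PySem.List.sorted (combo.map (fun item => item)) (fun x => x) false) combo)
          d).items.filter (fun p => ok p.1)).map (fun p => p.2)) := by
  induction cs generalizing seen acc d with
  | nil => simpa using hacc
  | cons c cs ih =>
    simp only [List.foldl_cons]
    set k := PySem.List.sorted (c.map (fun item => item)) (fun x => x) false with hk
    by_cases hdc : d.contains k = true
    · -- key already recorded: both sides leave state unchanged
      rw [PySem.Dict.setdefault_of_contains d c hdc]
      have hcond : (!(PySem.Set.contains seen k) && ok k) = false := by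
        rw [hseen k, hdc]
        cases ok k <;> simp
      simp only [hcond]
      exact ih seen acc d hseen hacc
    · have hdc' : d.contains k = false := by simpa using hdc
      rw [PySem.Dict.setdefault_of_not_contains d c hdc']
      have hsk : PySem.Set.contains seen k = false := by
        rw [hseen k, hdc']; simp
      by_cases hok : ok k = true
      · -- new passing key: A appends c, B's dict gains (k, c)
        have hcond : (!(PySem.Set.contains seen k) && ok k) = true := by
          rw [hsk, hok]; simp
        simp only [hcond]
        apply ih
        · intro k'
          rw [Bool.eq_iff_iff, set_contains_add seen k k', hseen k',
              PySem.Dict.contains_insert d k k' c]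
          by_cases he : k' = k
          · subst he; simp [hok, hdc']
          · simp [he]
        · rw [hacc, PySem.Dict.items_insert_of_not_contains d c hdc']
          simp [hok]
      · have hok' : ok k = false := by simpa using hok
        have hcond : (!(PySem.Set.contains seen k) && ok k) = false := by
          rw [hok']; simp
        simp only [hcond]
        apply ih
        · intro k'
          rw [hseen k', PySem.Dict.contains_insert d k k' c]
          by_cases he : k' = k
          · subst he; simp [hok', hdc']
          · have hb : (k' == k) = false := by simp [he]
            rw [hb, Bool.false_or]
        · rw [hacc, PySem.Dict.items_insert_of_not_contains d c hdc']
          simp [hok']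

-- ===== VERDICT (by name: the statement is the Claim_ definition above) =====
theorem unique_combinations_spec : Claim_equal_unique_combinations := by
  intro combinations list1 list2 _
  unfold Spec_unique_combinations unique_combinations unique_combinations_alt
  simp only [flatten_iter_eq]
  exact loop_eq
    (fun k => !(PySem.Set.equal (PySem.Set.ofList k) (PySem.Set.ofList ((flatten_list list1).map (fun item => item))))
           && !(PySem.Set.equal (PySem.Set.ofList k) (PySem.Set.ofList ((flatten_list list2).map (fun item => item)))))
    combinations PySem.Set.empty [] PySem.Dict.empty
    (fun k => by simp [PySem.Set.empty, PySem.Set.contains, PySem.Dict.empty, PySem.Dict.contains])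
    (by simp [PySem.Dict.empty])
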